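-- pv_equiv track=rewrite | github.com/o4eredko/jooble | utils.py | to_base62
-- ===== SOURCE A (Python) =====
-- import string
--
-- def to_base62(num, b=62):
-- 	if b <= 0 or b > 62:
-- 		return 0
-- 	base = string.digits + string.ascii_lowercase + string.ascii_uppercase
-- 	r = num % b
-- 	res = base[r]
-- 	q = num // b
-- 	while q:
-- 		r = q % b
-- 		q = q // b
-- 		res = base[int(r)] + res
-- 	return res
-- ===== SOURCE B (Python) =====
-- import string
--
-- def to_base62(num, b=62):
-- 	if b <= 0 or b > 62:
-- 		return 0
-- 	base = string.digits + string.ascii_lowercase + string.ascii_uppercase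
-- 	q, r = divmod(num, b)
-- 	if q == 0:
-- 		return base[r]
-- 	return to_base62(q, b) + base[r]
-- ===== Notes on version B (the rewrite author's own statement) =====
-- stated objective: alternative
-- what changed: The explicit while-loop that prepends least-significant digits to an accumulator is replaced by a recursion on the quotient (divmod once, recurse, append the digit), building the string most-significant-first; Pre_ excludes b outside 1..62 (A returns the int 0, not a string), negative num and b=1 with num>0 (A loops forever there).
-- outside the precondition, e.g. on to_base62(5, 0): A returns 0, B returns 0; on to_base62(7, 63): A returns 0, B returns 0
import Mathlib
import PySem

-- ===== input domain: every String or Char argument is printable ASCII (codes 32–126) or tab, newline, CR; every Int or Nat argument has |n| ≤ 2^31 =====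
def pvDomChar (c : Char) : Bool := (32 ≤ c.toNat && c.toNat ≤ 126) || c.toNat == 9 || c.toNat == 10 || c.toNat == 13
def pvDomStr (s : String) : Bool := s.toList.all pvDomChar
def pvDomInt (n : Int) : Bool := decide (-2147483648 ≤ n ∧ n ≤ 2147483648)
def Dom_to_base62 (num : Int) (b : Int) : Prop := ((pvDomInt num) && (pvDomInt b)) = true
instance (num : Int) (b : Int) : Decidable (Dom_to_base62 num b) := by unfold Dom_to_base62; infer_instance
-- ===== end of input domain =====

-- B replaces A's digit-prepending while-loop by a recursion on the quotient (same cost);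
-- equivalence is claimed on Pre_: 0 ≤ num, 1 ≤ b ≤ 62, not (b = 1 with num > 0).

-- ===== PORT A =====
-- 'string.digits + string.ascii_lowercase + string.ascii_uppercase', as a list of chars
def pvBase : List Char := "0123456789abcdefghijklmnopqrstuvwxyzABCDEFGHIJKLMNOPQRSTUVWXYZ".toList

-- base[i]: the one-char string Python indexes out; [] stands for IndexError (unreachable inside Pre_)
def pvDigit (i : Int) : List Char :=
  match PySem.List.pyGet? pvBase i with
  | some c => [c]
  | none => []

-- termination helper for the while-loop (the guard '1 ≤ q ∧ 2 ≤ b' only makes the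
-- recursion total; on every input admitted by Pre_ it coincides with Python's 'while q')
theorem pvFdivToNatLt {q b : Int} (h1 : 1 ≤ q) (h2 : 2 ≤ b) :
    (PySem.Int.floordiv q b).toNat < q.toNat := by
  rw [PySem.Int.floordiv_eq_ediv_of_pos (by omega)]
  have hd : 0 ≤ q / b := Int.ediv_nonneg (by omega) (by omega)
  have hmod : 0 ≤ q % b := Int.emod_nonneg q (by omega)
  have heq : b * (q / b) + q % b = q := Int.mul_ediv_add_emod q b
  have h2d : 2 * (q / b) ≤ q := by nlinarith
  omega

-- 'while q: r = q % b; q = q // b; res = base[int(r)] + res'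
def toBase62Loop (b q : Int) (res : List Char) : List Char :=
  if h : 1 ≤ q ∧ 2 ≤ b then
    toBase62Loop b (PySem.Int.floordiv q b) (pvDigit (PySem.Int.mod q b) ++ res)
  else res
termination_by q.toNat
decreasing_by exact pvFdivToNatLt h.1 h.2

def to_base62 (num : Int) (b : Int) : String :=
  if b ≤ 0 ∨ b > 62 then ""   -- Python A returns the int 0 here (not a str); excluded by Pre_
  else
    let r := PySem.Int.mod num b
    let res := pvDigit r
    let q := PySem.Int.floordiv num b
    String.ofList (toBase62Loop b q res)

-- ===== PORT B =====
-- 'q, r = divmod(num, b); if q == 0: return base[r]; return to_base62(q, b) + base[r]'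
-- (the extra '1 ≤ num ∧ 2 ≤ b' in the guard only makes the recursion total;
--  on every input admitted by Pre_ with q ≠ 0 it holds)
def toBase62Rec (num b : Int) : List Char :=
  let q := PySem.Int.floordiv num b
  let r := PySem.Int.mod num b
  if h : q ≠ 0 ∧ 1 ≤ num ∧ 2 ≤ b then
    toBase62Rec q b ++ pvDigit r
  else pvDigit r
termination_by num.toNat
decreasing_by exact pvFdivToNatLt h.2.1 h.2.2

def to_base62_alt (num : Int) (b : Int) : String :=
  if b ≤ 0 ∨ b > 62 then ""
  else String.ofList (toBase62Rec num b)

-- ===== PRECONDITION & SPEC =====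
-- Pre_ excludes: b outside 1..62, where A returns the int 0 (not a value of the declared
-- string type); negative num, and b = 1 with num > 0, where A's while-loop never terminates.
def Pre_to_base62 (num : Int) (b : Int) : Prop :=
  0 ≤ num ∧ 1 ≤ b ∧ b ≤ 62 ∧ (b = 1 → num = 0)
instance (num : Int) (b : Int) : Decidable (Pre_to_base62 num b) := by
  unfold Pre_to_base62; infer_instance

def pvWitness_to_base62 : Int × Int := (12345, 62)

def Spec_to_base62 (num : Int) (b : Int) (out : String) : Prop := out = to_base62_alt num b
instance (num : Int) (b : Int) (out : String) : Decidable (Spec_to_base62 num b out) := by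
  unfold Spec_to_base62; infer_instance

-- ===== CLAIM (what is proved, stated in full; the proofs are below) =====
def Claim_equal_to_base62 : Prop := ∀ (num : Int) (b : Int), Dom_to_base62 num b → Pre_to_base62 num b → Spec_to_base62 num b (to_base62 num b)

-- ===== LEMMAS AND PROOFS =====

-- the loop's accumulator is only ever appended to on the right
theorem toBase62Loop_append : ∀ (n : Nat) (q b : Int), q.toNat = n → ∀ (s : List Char),
    toBase62Loop b q s = toBase62Loop b q [] ++ s := by
  intro n
  induction n using Nat.strong_induction_on with
  | _ n ih =>
    intro q b hn s
    conv_lhs => rw [toBase62Loop]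
    conv_rhs => rw [toBase62Loop]
    split_ifs with h
    · rw [ih ((PySem.Int.floordiv q b).toNat) (hn ▸ pvFdivToNatLt h.1 h.2) _ _ rfl
          (pvDigit (PySem.Int.mod q b) ++ s),
        ih ((PySem.Int.floordiv q b).toNat) (hn ▸ pvFdivToNatLt h.1 h.2) _ _ rfl
          (pvDigit (PySem.Int.mod q b) ++ [])]
      simp
    · simp

-- B's recursion computes exactly what A's loop accumulates
theorem toBase62Rec_eq_loop : ∀ (n : Nat) (num b : Int), num.toNat = n →
    0 ≤ num → 1 ≤ b → (b = 1 → num = 0) →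
    toBase62Rec num b =
      toBase62Loop b (PySem.Int.floordiv num b) [] ++ pvDigit (PySem.Int.mod num b) := by
  intro n
  induction n using Nat.strong_induction_on with
  | _ n ih =>
    intro num b hn h0 hb1 hb
    rw [toBase62Rec]
    by_cases hq : PySem.Int.floordiv num b = 0
    · rw [toBase62Loop]
      simp [hq]
    · have hb2 : 2 ≤ b := by
        by_contra hlt
        have hbeq : b = 1 := by omega
        have : num = 0 := hb hbeq
        subst this; subst hbeq
        exact hq (by decide)
      have hq0 : 0 ≤ PySem.Int.floordiv num b := by
        rw [PySem.Int.floordiv_eq_ediv_of_pos (by omega)]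
        exact Int.ediv_nonneg h0 (by omega)
      have hq1 : 1 ≤ PySem.Int.floordiv num b := by omega
      have hnum1 : 1 ≤ num := by
        by_contra hlt
        have : num = 0 := by omega
        subst this
        have : PySem.Int.floordiv 0 b = 0 := by
          rw [PySem.Int.floordiv_eq_ediv_of_pos (by omega)]; simp
        exact hq this
      simp only [dif_pos (show PySem.Int.floordiv num b ≠ 0 ∧ 1 ≤ num ∧ 2 ≤ b from ⟨hq, hnum1, hb2⟩)]
      have hlt : (PySem.Int.floordiv num b).toNat < n := hn ▸ pvFdivToNatLt hnum1 hb2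
      rw [ih ((PySem.Int.floordiv num b).toNat) hlt _ _ rfl hq0 (by omega) (by omega)]
      conv_rhs => rw [toBase62Loop]
      rw [dif_pos ⟨hq1, hb2⟩,
        toBase62Loop_append ((PySem.Int.floordiv (PySem.Int.floordiv num b) b).toNat) _ _ rfl
          (pvDigit (PySem.Int.mod (PySem.Int.floordiv num b) b) ++ [])]
      simp

-- ===== VERDICT (by name: the statement is the Claim_ definition above) =====
theorem to_base62_spec : Claim_equal_to_base62 := by
  intro num b _ hpre
  obtain ⟨h0, hb1, hb62, hbone⟩ := hpre
  simp only [Spec_to_base62, to_base62, to_base62_alt,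
    if_neg (show ¬(b ≤ 0 ∨ b > 62) by omega)]
  rw [toBase62Rec_eq_loop num.toNat num b rfl h0 hb1 hbone,
    toBase62Loop_append ((PySem.Int.floordiv num b).toNat) _ _ rfl
      (pvDigit (PySem.Int.mod num b))]
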